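-- pv_equiv track=rewrite | github.com/furkankarakus10/pythonprogramming | gomulufonsiyonlar/map.py | aa
-- ===== SOURCE A (Python) =====
-- def aa(x):
--     a = []
--     b = []
--
--     for i in x:
--         for index,eleman in enumerate(i):
--             if (index % 2 == 0):
--                 a.append(eleman)
--             else:
--                 b.append(eleman)
--
--     c = list(map(lambda x,y : x * y ,a,b))
--
--     return c
-- ===== SOURCE B (Python) =====
-- def aa(x):
--     # Stream products directly: keep a FIFO of even-position elements not yet
--     # multiplied; each odd-position element immediately consumes the oldest one.
--     # The odd-position list and the final map/zip disappear entirely.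
--     c = []
--     pending = []   # even-position elements awaiting a partner
--     k = 0          # index of the oldest unconsumed element of pending
--     for row in x:
--         j = 0
--         n = len(row)
--         while j + 1 < n:
--             pending.append(row[j])
--             c.append(pending[k] * row[j + 1])
--             k += 1
--             j += 2
--         if j < n:
--             pending.append(row[j])
--     return c
-- ===== Notes on version B (the rewrite author's own statement) =====
-- stated objective: alternative
-- what changed: Instead of partitioning all elements into an even-index list and an odd-index list and then zipping them with map, B streams the products out in a single pass: it keeps a FIFO of even-position elements awaiting a partner and every odd-position element immediately emits the product with the oldest queued one; the odd-position list and the final map/zip are never built.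
import Mathlib
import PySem

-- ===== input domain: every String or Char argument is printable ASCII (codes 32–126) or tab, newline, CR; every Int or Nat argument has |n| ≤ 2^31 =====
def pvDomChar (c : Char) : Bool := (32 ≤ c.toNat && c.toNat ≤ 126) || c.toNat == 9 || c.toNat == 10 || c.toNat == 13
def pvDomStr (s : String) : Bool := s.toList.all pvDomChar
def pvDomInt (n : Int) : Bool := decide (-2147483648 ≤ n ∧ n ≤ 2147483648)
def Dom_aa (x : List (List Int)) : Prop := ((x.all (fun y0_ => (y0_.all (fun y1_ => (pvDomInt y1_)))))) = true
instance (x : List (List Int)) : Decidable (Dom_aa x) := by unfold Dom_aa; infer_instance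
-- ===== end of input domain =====

-- B streams the products in one pass via a FIFO of unmatched even-position elements (no odd-position list, no map/zip); same cost, different algorithm.


-- ===== PORT A =====
-- for i in x: for index,eleman in enumerate(i): parity branch appending to a / b; then list(map(lambda x,y: x*y, a, b))
def aa (x : List (List Int)) : List Int :=
  let ab := x.foldl (fun (ab : List Int × List Int) i =>
      (PySem.List.enumerate i 0).foldl (fun (ab : List Int × List Int) ie =>
          if PySem.Int.mod ie.1 2 == 0 then (ab.1 ++ [ie.2], ab.2)
          else (ab.1, ab.2 ++ [ie.2])) ab) ([], [])
  List.zipWith (· * ·) ab.1 ab.2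

-- ===== PORT B =====
-- Source B inner 'while j + 1 < n' loop: consume the row two elements at a time;
-- pending[k] is always in range (k < len pending), so getD's default 0 is never used.
def rowStep (c : List Int) (pending : List Int) (k : Nat) : List Int → List Int × List Int × Nat
  | [] => (c, pending, k)
  | [p] => (c, pending ++ [p], k)
  | p :: q :: rest =>
      rowStep (c ++ [(pending ++ [p]).getD k 0 * q]) (pending ++ [p]) (k + 1) rest

def aa_alt (x : List (List Int)) : List Int :=
  (x.foldl (fun (s : List Int × List Int × Nat) row => rowStep s.1 s.2.1 s.2.2 row)
    ([], [], 0)).1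

-- ===== PRECONDITION & SPEC =====
def Spec_aa (x : List (List Int)) (out : List Int) : Prop := out = aa_alt x
instance (x : List (List Int)) (out : List Int) : Decidable (Spec_aa x out) := by unfold Spec_aa; infer_instance

-- ===== CLAIM (what is proved, stated in full; the proofs are below) =====
def Claim_equal_aa : Prop := ∀ (x : List (List Int)), Dom_aa x → Spec_aa x (aa x)

-- ===== LEMMAS AND PROOFS =====

-- proof-side helper: the even/odd-position halves of one row
def pairSplit : List Int → List Int × List Int
  | [] => ([], [])
  | [p] => ([p], [])
  | p :: q :: rest =>
      let ab := pairSplit rest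
      (p :: ab.1, q :: ab.2)

lemma pairSplit_len (r : List Int) : (pairSplit r).2.length ≤ (pairSplit r).1.length := by
  induction r using pairSplit.induct with
  | case1 => simp [pairSplit]
  | case2 p => simp [pairSplit]
  | case3 p q rest ih => simpa [pairSplit] using ih

-- A's inner enumerate/parity fold, started at an even index, appends exactly pairSplit's two halves.
lemma inner_fold_eq (row : List Int) : ∀ (s : Int) (a b : List Int), s % 2 = 0 →
    (PySem.List.enumerate row s).foldl (fun (ab : List Int × List Int) ie =>
          if PySem.Int.mod ie.1 2 == 0 then (ab.1 ++ [ie.2], ab.2)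
          else (ab.1, ab.2 ++ [ie.2])) (a, b)
      = (a ++ (pairSplit row).1, b ++ (pairSplit row).2) := by
  induction row using pairSplit.induct with
  | case1 => intro s a b _; simp [PySem.List.enumerate, pairSplit]
  | case2 p =>
      intro s a b hs
      have hd1 : (2:Int) ∣ s := by omega
      simp [PySem.List.enumerate, pairSplit, hd1]
  | case3 p q rest ih =>
      intro s a b hs
      have hd1 : (2:Int) ∣ s := by omega
      have hd2 : ¬ (2:Int) ∣ (s+1) := by omega
      have h3 : (s + 1 + 1) % 2 = 0 := by omega
      have h := ih (s+1+1) (a ++ [p]) (b ++ [q]) h3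
      simp only [PySem.List.enumerate_cons, List.foldl_cons]
      simp [hd1, hd2]
      simpa [pairSplit, List.append_assoc] using h

-- A's value: the two concatenated halves, zipped with (*)
lemma aa_closed (x : List (List Int)) :
    aa x = List.zipWith (· * ·) (x.flatMap (fun r => (pairSplit r).1))
                               (x.flatMap (fun r => (pairSplit r).2)) := by
  unfold aa
  have : ∀ (a b : List Int),
      x.foldl (fun (ab : List Int × List Int) i =>
        (PySem.List.enumerate i 0).foldl (fun (ab : List Int × List Int) ie =>
            if PySem.Int.mod ie.1 2 == 0 then (ab.1 ++ [ie.2], ab.2)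
            else (ab.1, ab.2 ++ [ie.2])) ab) (a, b)
      = (a ++ x.flatMap (fun r => (pairSplit r).1), b ++ x.flatMap (fun r => (pairSplit r).2)) := by
    induction x with
    | nil => intro a b; simp
    | cons r rs ih =>
        intro a b
        simp only [List.foldl_cons, inner_fold_eq r 0 a b (by omega)]
        rw [ih]
        simp [List.flatMap_cons, List.append_assoc]
  rw [this [] []]
  simp

-- zipWith truncation: extending the longer list beyond the shorter's reach changes nothing
lemma zipWith_left_ext (f : Int → Int → Int) :
    ∀ (O P E : List Int), O.length ≤ P.length →
      List.zipWith f (P ++ E) O = List.zipWith f P O := by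
  intro O
  induction O with
  | nil => simp
  | cons o os ih =>
      intro P E h
      cases P with
      | nil => simp at h
      | cons p ps =>
          simp only [List.cons_append, List.zipWith_cons_cons]
          rw [ih ps E (by simpa using h)]

-- splitting a zip at |O| when O fits inside P
lemma zipWith_split (f : Int → Int → Int) :
    ∀ (O O₂ P : List Int), O.length ≤ P.length →
      List.zipWith f P (O ++ O₂) = List.zipWith f P O ++ List.zipWith f (P.drop O.length) O₂ := by
  intro O
  induction O with
  | nil => simp
  | cons o os ih =>
      intro O₂ P h
      cases P with
      | nil => simp at h
      | cons p ps =>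
          simp only [List.cons_append, List.zipWith_cons_cons, List.length_cons, List.drop_succ_cons]
          rw [ih O₂ ps (by simpa using h)]

-- the element B reads from the queue is the head of the remaining (dropped) queue
lemma drop_head (p : Int) (s : List Int) :
    ∀ (P : List Int) (k : Nat), k ≤ P.length →
      (P ++ p :: s).drop k = (P ++ [p]).getD k 0 :: (P ++ [p] ++ s).drop (k + 1) := by
  intro P
  induction P with
  | nil =>
      intro k hk
      have hk0 : k = 0 := Nat.le_zero.mp (by simpa using hk)
      subst hk0; simp
  | cons a as ih =>
      intro k hk
      cases k with
      | zero => simp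
      | succ m =>
          simp only [List.cons_append, List.drop_succ_cons, List.getD, List.getElem?_cons_succ]
          exact ih m (by simpa using hk)

-- one row of B: queue gains the even half, counter gains |odd half|, output gains the new products
lemma rowStep_eq (r : List Int) : ∀ (c P : List Int) (k : Nat), k ≤ P.length →
    rowStep c P k r
      = (c ++ List.zipWith (· * ·) ((P ++ (pairSplit r).1).drop k) (pairSplit r).2,
         P ++ (pairSplit r).1, k + (pairSplit r).2.length) := by
  induction r using pairSplit.induct with
  | case1 => intro c P k hk; simp [rowStep, pairSplit]
  | case2 p => intro c P k hk; simp [rowStep, pairSplit]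
  | case3 p q rest ih =>
      intro c P k hk
      have hk' : k + 1 ≤ (P ++ [p]).length := by simpa using Nat.succ_le_succ hk
      simp only [rowStep, ih _ _ _ hk', pairSplit]
      rw [drop_head p (pairSplit rest).1 P k hk]
      simp [List.append_assoc]
      omega

-- B's fold maintains: output = zipWith of queue against all odds so far, counter = |odds so far|
lemma alt_fold_eq (x : List (List Int)) :
    ∀ (c P O : List Int), O.length ≤ P.length → c = List.zipWith (· * ·) P O →
      (x.foldl (fun (s : List Int × List Int × Nat) row => rowStep s.1 s.2.1 s.2.2 row)
        (c, P, O.length)).1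
      = List.zipWith (· * ·) (P ++ x.flatMap (fun r => (pairSplit r).1))
                             (O ++ x.flatMap (fun r => (pairSplit r).2)) := by
  induction x with
  | nil => intro c P O h hc; simpa using hc
  | cons r rs ih =>
      intro c P O h hc
      simp only [List.foldl_cons, rowStep_eq r c P O.length (le_trans h (le_refl _))]
      have hlen : (O ++ (pairSplit r).2).length ≤ (P ++ (pairSplit r).1).length := by
        simp [Nat.add_le_add h (pairSplit_len r)]
      have hstep : c ++ List.zipWith (· * ·) ((P ++ (pairSplit r).1).drop O.length) (pairSplit r).2
          = List.zipWith (· * ·) (P ++ (pairSplit r).1) (O ++ (pairSplit r).2) := by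
        rw [zipWith_split (· * ·) O (pairSplit r).2 (P ++ (pairSplit r).1)
              (le_trans h (by simp)), hc, zipWith_left_ext (· * ·) O P (pairSplit r).1 h]
      have := ih (c ++ List.zipWith (· * ·) ((P ++ (pairSplit r).1).drop O.length) (pairSplit r).2)
        (P ++ (pairSplit r).1) (O ++ (pairSplit r).2) hlen hstep
      simp only [List.length_append] at this
      simpa [List.flatMap_cons, List.append_assoc] using this

theorem aa_eq_alt (x : List (List Int)) : aa x = aa_alt x := by
  rw [aa_closed]
  unfold aa_alt
  have := alt_fold_eq x [] [] [] (by simp) (by simp)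
  simpa using this.symm

-- ===== VERDICT (by name: the statement is the Claim_ definition above) =====
theorem aa_spec : Claim_equal_aa := by
  intro x _
  unfold Spec_aa
  exact aa_eq_alt x
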